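-- pv_equiv track=rewrite | github.com/gwicho38/mcli | src/mcli/lib/pyenv/deps.py | parse_requires
-- ===== SOURCE A (Python) =====
-- from typing import Dict, List, Tuple
--
-- def parse_requires(requires: List[str]) -> List[str]:
--     """Parse @requires list into normalized package specifications.
--
--     Handles comma-separated values and normalizes package names.
--
--     Args:
--         requires: List of requirement strings (may be comma-separated).
--
--     Returns:
--         List of normalized package specifications.
--     """
--     packages = []
--     for req in requires:
--         # Split by comma if multiple packages in one string
--         for part in req.split(","):
--             part = part.strip()
--             if part:
--                 packages.append(part)
--     return packages
-- ===== SOURCE B (Python) =====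
-- from typing import List
--
--
-- def parse_requires(requires: List[str]) -> List[str]:
--     """Character-level state machine: scan each string once, building tokens
--     directly (commas delimit; leading whitespace is skipped, interior whitespace
--     buffered, trailing whitespace discarded) -- no split()/strip() calls."""
--     packages = []
--     for req in requires:
--         token = []  # committed chars of the current token (never starts/ends with ws)
--         run = []    # pending interior whitespace run
--         for c in req:
--             if c == ',':
--                 if token:
--                     packages.append(''.join(token))
--                 token = []
--                 run = []
--             elif c.isspace():
--                 if token:
--                     run.append(c)
--             else:
--                 token.extend(run)
--                 run = []
--                 token.append(c)
--         if token:
--             packages.append(''.join(token))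
--     return packages
-- ===== Notes on version B (the rewrite author's own statement) =====
-- stated objective: alternative
-- what changed: Replaces A's split-then-strip-then-filter pipeline with a single character-level state machine that scans each string once, emitting tokens at commas while skipping leading whitespace and buffering interior whitespace so trailing whitespace is discarded, never calling split or strip.
import Mathlib
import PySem

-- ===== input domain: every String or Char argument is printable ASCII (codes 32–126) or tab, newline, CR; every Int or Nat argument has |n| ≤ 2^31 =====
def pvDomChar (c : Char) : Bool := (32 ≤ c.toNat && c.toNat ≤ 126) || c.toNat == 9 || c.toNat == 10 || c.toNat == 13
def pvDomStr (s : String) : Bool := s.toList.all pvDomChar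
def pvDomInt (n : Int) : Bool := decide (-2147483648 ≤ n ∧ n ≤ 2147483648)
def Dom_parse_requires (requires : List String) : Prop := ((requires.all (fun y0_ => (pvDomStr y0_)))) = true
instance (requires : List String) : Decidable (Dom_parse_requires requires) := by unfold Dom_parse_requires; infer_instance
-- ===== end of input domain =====

-- B replaces A's split/strip/filter pipeline by a single character-level state machine
-- that emits tokens at commas, skipping leading and discarding trailing whitespace
-- (alternative decomposition, same cost).

-- ===== PORT A =====
-- '.split(",")' with the literal non-empty separator never raises: '.getD []' only
-- discharges the Option (the 'none' branch is unreachable for sep = ",").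
def parse_requires (requires : List String) : List String :=
  requires.foldl (fun packages req =>
    ((PySem.Str.split? req ",").getD []).foldl (fun packages part =>
      let part := PySem.Str.strip part
      if part ≠ "" then packages ++ [part] else packages) packages) []

-- ===== PORT B =====
-- state machine over the characters of one string: token = committed chars of the
-- current token, run = pending interior whitespace; flush the token at ',' and at the end
def pvScan : List Char → List Char → List Char → List String → List String
  | [], token, _run, acc =>
      if token.isEmpty then acc else acc ++ [String.ofList token]
  | c :: cs, token, run, acc =>
      if c = ',' then
        pvScan cs [] [] (if token.isEmpty then acc else acc ++ [String.ofList token])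
      else if PySem.Chars.isspace c then
        pvScan cs token (if token.isEmpty then run else run ++ [c]) acc
      else
        pvScan cs (token ++ run ++ [c]) [] acc

def parse_requires_alt (requires : List String) : List String :=
  requires.foldl (fun acc req => pvScan req.toList [] [] acc) []

-- ===== PRECONDITION & SPEC =====
def Spec_parse_requires (requires : List String) (out : List String) : Prop := out = parse_requires_alt requires
instance (requires : List String) (out : List String) : Decidable (Spec_parse_requires requires out) := by unfold Spec_parse_requires; infer_instance

-- ===== CLAIM (what is proved, stated in full; the proofs are below) =====
def Claim_equal_parse_requires : Prop := ∀ (requires : List String), Dom_parse_requires requires → Spec_parse_requires requires (parse_requires requires)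

-- ===== LEMMAS AND PROOFS =====

-- Structural single-character comma split (proof-side mirror of PySem.Chars.splitOn for sep = [c]).
def csplit (c : Char) : List Char → List (List Char)
  | [] => [[]]
  | x :: xs => if x = c then [] :: csplit c xs else (csplit c xs).modifyHead (x :: ·)

theorem csplit_ne_nil (c : Char) (l : List Char) : csplit c l ≠ [] := by
  induction l with
  | nil => simp [csplit]
  | cons x xs ih =>
    simp only [csplit]
    split
    · simp
    · cases h : csplit c xs with
      | nil => exact absurd h ih
      | cons a t => simp

theorem splitOn_go_eq (c : Char) (fuel : Nat) (l cur : List Char) (acc : List (List Char))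
    (h : l.length ≤ fuel) :
    PySem.Chars.splitOn.go [c] fuel l cur acc
      = acc.reverse ++ (csplit c l).modifyHead (cur.reverse ++ ·) := by
  induction fuel generalizing l cur acc with
  | zero =>
    have : l = [] := List.length_eq_zero_iff.mp (Nat.le_zero.mp h)
    subst this
    simp [PySem.Chars.splitOn.go, csplit]
  | succ fuel ih =>
    cases l with
    | nil => simp [PySem.Chars.splitOn.go, csplit]
    | cons x rest =>
      simp only [PySem.Chars.splitOn.go]
      by_cases hx : x = c
      · subst hx
        have hpre : List.isPrefixOf [x] (x :: rest) = true := by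
          simp [List.isPrefixOf]
        rw [if_pos hpre]
        have hlen : rest.length ≤ fuel := by
          simpa using Nat.le_of_succ_le_succ (by simpa using h)
        rw [ih _ _ _ (by simpa using hlen)]
        obtain ⟨a, t, hct⟩ : ∃ a t, csplit x rest = a :: t := by
          cases hcc : csplit x rest with
          | nil => exact absurd hcc (csplit_ne_nil x rest)
          | cons a t => exact ⟨a, t, rfl⟩
        simp [csplit, hct]
      · have hpre : List.isPrefixOf [c] (x :: rest) = false := by
          simp [List.isPrefixOf]
          exact fun hc => absurd hc.symm hx
        rw [if_neg (by simp [hpre])]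
        have hlen : rest.length ≤ fuel := by
          simpa using Nat.le_of_succ_le_succ (by simpa using h)
        rw [ih _ _ _ hlen]
        obtain ⟨a, t, hct⟩ : ∃ a t, csplit c rest = a :: t := by
          cases hcc : csplit c rest with
          | nil => exact absurd hcc (csplit_ne_nil c rest)
          | cons a t => exact ⟨a, t, rfl⟩
        simp [csplit, hx, hct]

theorem splitOn_eq_csplit (c : Char) (s : List Char) :
    PySem.Chars.splitOn s [c] = csplit c s := by
  unfold PySem.Chars.splitOn
  rw [splitOn_go_eq c (s.length + 1) s [] [] (Nat.le_succ _)]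
  obtain ⟨a, t, hct⟩ : ∃ a t, csplit c s = a :: t := by
    cases hcc : csplit c s with
    | nil => exact absurd hcc (csplit_ne_nil c s)
    | cons a t => exact ⟨a, t, rfl⟩
  simp [hct]

theorem csplit_append (c : Char) (a b : List Char) :
    csplit c (a ++ c :: b) = csplit c a ++ csplit c b := by
  induction a with
  | nil => simp [csplit]
  | cons x xs ih =>
    by_cases hx : x = c
    · subst hx
      simp [csplit, ih]
    · obtain ⟨h0, t0, hct⟩ : ∃ h0 t0, csplit c xs = h0 :: t0 := by
        cases hcc : csplit c xs with
        | nil => exact absurd hcc (csplit_ne_nil c xs)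
        | cons h0 t0 => exact ⟨h0, t0, rfl⟩
      simp [csplit, hx, ih, hct]

theorem csplit_singleton (c : Char) (l : List Char) (h : c ∉ l) : csplit c l = [l] := by
  induction l with
  | nil => rfl
  | cons x xs ih =>
    simp only [List.mem_cons, not_or] at h
    have hx : ¬ x = c := fun hxc => h.1 hxc.symm
    simp [csplit, hx, ih h.2]

-- strip-then-drop-empties at the char level
def charParse (s : List Char) : List (List Char) :=
  ((csplit ',' s).map PySem.Chars.strip).filter (fun p => p ≠ [])

-- the String-level split used by port A, pushed down to csplit
theorem strSplit_eq (s : String) :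
    (PySem.Str.split? s ",").getD [] = (csplit ',' s.toList).map String.ofList := by
  have h := PySem.Str.split?_map s ","
  have hsep : ("," : String).toList = [','] := by decide
  rw [hsep] at h
  simp only [PySem.Chars.split?, List.isEmpty_cons, if_false, Bool.false_eq_true] at h
  rw [splitOn_eq_csplit] at h
  cases hs : PySem.Str.split? s "," with
  | none => rw [hs] at h; simp at h
  | some L =>
    rw [hs] at h
    simp only [Option.map_some, Option.some.injEq] at h
    have : L = (L.map String.toList).map String.ofList := by
      simp [List.map_map, Function.comp_def]
    rw [Option.getD_some, this, h]

theorem ofList_strip (cs : List Char) :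
    PySem.Str.strip (String.ofList cs) = String.ofList (PySem.Chars.strip cs) := by
  apply String.toList_injective
  simp [PySem.Str.toList_strip]

theorem strPipeline_eq (s : String) :
    (((PySem.Str.split? s ",").getD []).map PySem.Str.strip).filter (fun p => p ≠ "")
      = (charParse s.toList).map String.ofList := by
  rw [strSplit_eq]
  simp only [List.map_map]
  have hmap : PySem.Str.strip ∘ String.ofList = String.ofList ∘ PySem.Chars.strip := by
    funext cs; exact ofList_strip cs
  rw [hmap, ← List.map_map]
  rw [List.filter_map]
  have hpred : ((fun p => decide (p ≠ "")) ∘ String.ofList) = fun cs => decide (cs ≠ []) := by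
    funext cs
    simp only [Function.comp_apply, decide_eq_decide]
    constructor
    · intro hne hnil; exact hne (by simp [hnil])
    · intro hne hs
      apply hne
      have := congrArg String.toList hs
      simpa using this
  rw [hpred]
  rfl

-- A as a flatMap of the per-string pipeline
theorem parse_requires_eq_flatMap (requires : List String) :
    parse_requires requires
      = requires.flatMap (fun req =>
          (((PySem.Str.split? req ",").getD []).map PySem.Str.strip).filter (fun p => p ≠ "")) := by
  unfold parse_requires
  have hinner : ∀ (acc : List String) (parts : List String),
      parts.foldl (fun packages part =>
        let part := PySem.Str.strip part
        if part ≠ "" then packages ++ [part] else packages) acc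
      = acc ++ (parts.map PySem.Str.strip).filter (fun p => p ≠ "") := by
    intro acc parts
    have := PySem.List.foldl_append_if (fun part => decide (PySem.Str.strip part ≠ ""))
      PySem.Str.strip parts acc
    simp only at this
    rw [show (fun (packages : List String) part =>
        let part := PySem.Str.strip part
        if part ≠ "" then packages ++ [part] else packages)
      = (fun packages part =>
        if decide (PySem.Str.strip part ≠ "") = true then packages ++ [PySem.Str.strip part]
        else packages) from by funext packages part; simp]
    rw [this, List.filter_map]
    rfl
  calc requires.foldl (fun packages req =>
        ((PySem.Str.split? req ",").getD []).foldl (fun packages part =>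
          let part := PySem.Str.strip part
          if part ≠ "" then packages ++ [part] else packages) packages) []
      = requires.foldl (fun packages req =>
          packages ++ ((((PySem.Str.split? req ",").getD []).map PySem.Str.strip).filter
            (fun p => p ≠ ""))) [] := by
        apply List.foldl_ext
        intro acc req _
        exact hinner acc _
    _ = _ := by
        rw [PySem.List.foldl_append_eq_flatMap]
        simp

-- ── strip helper lemmas for the state machine ──

theorem strip_cons_ws (c : Char) (l : List Char) (h : PySem.Chars.isspace c = true) :
    PySem.Chars.strip (c :: l) = PySem.Chars.strip l := by
  simp [PySem.Chars.strip, PySem.Chars.lstrip, h]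

theorem rstrip_append_ws (l run : List Char) (hr : run.all PySem.Chars.isspace = true) :
    PySem.Chars.rstrip (l ++ run) = PySem.Chars.rstrip l := by
  simp only [PySem.Chars.rstrip, List.reverse_append]
  rw [List.dropWhile_append]
  have hnil : run.reverse.dropWhile PySem.Chars.isspace = [] := by
    rw [List.dropWhile_eq_nil_iff]
    intro x hx
    exact (List.all_eq_true.mp hr) x (List.mem_reverse.mp hx)
  simp [hnil]

theorem rstrip_concat (l : List Char) (a : Char) (h : PySem.Chars.isspace a = false) :
    PySem.Chars.rstrip (l ++ [a]) = l ++ [a] := by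
  simp [PySem.Chars.rstrip, h]

theorem getLastI_append_singleton (l : List Char) (a : Char) : (l ++ [a]).getLastI = a := by
  simp [List.getLastI_eq_getLast?_getD]

theorem strip_token_run (token run : List Char) (ht : token ≠ [])
    (hh : PySem.Chars.isspace token.headI = false)
    (hl : PySem.Chars.isspace token.getLastI = false)
    (hr : run.all PySem.Chars.isspace = true) :
    PySem.Chars.strip (token ++ run) = token := by
  obtain ⟨t, ts, rfl⟩ := List.exists_cons_of_ne_nil ht
  have hh' : PySem.Chars.isspace t = false := by simpa using hh
  have hlstrip : PySem.Chars.lstrip ((t :: ts) ++ run) = (t :: ts) ++ run := by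
    simp [PySem.Chars.lstrip, hh']
  show PySem.Chars.rstrip (PySem.Chars.lstrip ((t :: ts) ++ run)) = t :: ts
  rw [hlstrip, rstrip_append_ws _ _ hr]
  obtain ⟨l', a, hconcat⟩ : ∃ l' a, t :: ts = l' ++ [a] := by
    rcases List.eq_nil_or_concat (t :: ts) with h | ⟨l', a, h⟩
    · exact absurd h (by simp)
    · rw [List.concat_eq_append] at h
      exact ⟨l', a, h⟩
  rw [hconcat]
  apply rstrip_concat
  have : (t :: ts).getLastI = a := by rw [hconcat]; exact getLastI_append_singleton l' a
  rw [← this]; exact hl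

theorem charParse_cons_ws (c : Char) (cs : List Char)
    (hws : PySem.Chars.isspace c = true) (hc : ¬ c = ',') :
    charParse (c :: cs) = charParse cs := by
  obtain ⟨h0, t0, hct⟩ : ∃ h0 t0, csplit ',' cs = h0 :: t0 := by
    cases hcc : csplit ',' cs with
    | nil => exact absurd hcc (csplit_ne_nil ',' cs)
    | cons h0 t0 => exact ⟨h0, t0, rfl⟩
  simp [charParse, csplit, hc, hct, strip_cons_ws c h0 hws]

-- the state-machine invariant: scanning cs from state (token, run) produces exactly the
-- stripped non-empty comma fragments of token ++ run ++ cs, appended to acc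
theorem pvScan_eq (cs : List Char) : ∀ (token run : List Char) (acc : List String),
    (token = [] → run = []) →
    run.all PySem.Chars.isspace = true →
    ',' ∉ token →
    (token ≠ [] → PySem.Chars.isspace token.headI = false ∧ PySem.Chars.isspace token.getLastI = false) →
    pvScan cs token run acc = acc ++ (charParse (token ++ run ++ cs)).map String.ofList := by
  induction cs with
  | nil =>
    intro token run acc hinv hr hcm hends
    have hnc : ',' ∉ token ++ run := by
      intro hmem
      rcases List.mem_append.mp hmem with h | h
      · exact hcm h
      · exact absurd ((List.all_eq_true.mp hr) ',' h) (by decide)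
    by_cases ht : token = []
    · subst ht
      have : run = [] := hinv rfl
      subst this
      simp [pvScan, charParse, csplit, PySem.Chars.strip, PySem.Chars.lstrip, PySem.Chars.rstrip]
    · have hstrip := strip_token_run token run ht (hends ht).1 (hends ht).2 hr
      simp only [List.append_nil]
      rw [show pvScan [] token run acc
          = (if token.isEmpty then acc else acc ++ [String.ofList token]) from rfl]
      rw [if_neg (by simpa using ht)]
      simp [charParse, csplit_singleton ',' (token ++ run) hnc, hstrip, ht]
  | cons c cs ih =>
    intro token run acc hinv hr hcm hends
    by_cases hc : c = ','
    · subst hc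
      have hnc : ',' ∉ token ++ run := by
        intro hmem
        rcases List.mem_append.mp hmem with h | h
        · exact hcm h
        · exact absurd ((List.all_eq_true.mp hr) ',' h) (by decide)
      rw [show pvScan (',' :: cs) token run acc
          = pvScan cs [] [] (if token.isEmpty then acc else acc ++ [String.ofList token]) from by
            simp [pvScan]]
      rw [ih [] [] _ (fun _ => rfl) (by decide) (by simp) (by simp)]
      have hsplit : charParse (token ++ run ++ (',' :: cs))
          = (([PySem.Chars.strip (token ++ run)]).filter (fun p => p ≠ [])) ++ charParse cs := by
        simp only [charParse]
        rw [csplit_append ',' (token ++ run) cs, csplit_singleton ',' (token ++ run) hnc]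
        simp only [List.map_append, List.filter_append, List.map_cons, List.map_nil]
      rw [hsplit]
      by_cases ht : token = []
      · subst ht
        have : run = [] := hinv rfl
        subst this
        simp [PySem.Chars.strip, PySem.Chars.lstrip, PySem.Chars.rstrip]
      · have hstrip := strip_token_run token run ht (hends ht).1 (hends ht).2 hr
        rw [if_neg (by simpa using ht)]
        simp [hstrip, ht]
    · by_cases hws : PySem.Chars.isspace c = true
      · rw [show pvScan (c :: cs) token run acc
            = pvScan cs token (if token.isEmpty then run else run ++ [c]) acc from by
              simp [pvScan, hc, hws]]
        by_cases ht : token = []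
        · subst ht
          have : run = [] := hinv rfl
          subst this
          rw [if_pos (show ([] : List Char).isEmpty = true from rfl)]
          rw [ih [] [] _ (fun _ => rfl) (by decide) (by simp) (by simp)]
          simp [charParse_cons_ws c cs hws hc]
        · rw [if_neg (by simpa using ht)]
          rw [ih token (run ++ [c]) _ (fun h => absurd h ht)
            (by simp [List.all_eq_true] at hr ⊢; exact ⟨hr, hws⟩) hcm hends]
          simp
      · have hws' : PySem.Chars.isspace c = false := by
          cases h : PySem.Chars.isspace c
          · rfl
          · exact absurd h hws
        rw [show pvScan (c :: cs) token run acc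
            = pvScan cs (token ++ run ++ [c]) [] acc from by
              simp [pvScan, hc, hws']]
        have hne : token ++ run ++ [c] ≠ [] := by simp
        rw [ih (token ++ run ++ [c]) [] _ (fun h => absurd h hne) (by decide)
          (by
            intro hmem
            rcases List.mem_append.mp hmem with h | h
            · rcases List.mem_append.mp h with h | h
              · exact hcm h
              · exact absurd ((List.all_eq_true.mp hr) ',' h) (by decide)
            · simp at h; exact hc h.symm)
          (by
            intro _
            constructor
            · by_cases ht : token = []
              · subst ht
                have : run = [] := hinv rfl
                subst this
                simpa using hws'
              · obtain ⟨t, ts, rfl⟩ := List.exists_cons_of_ne_nil ht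
                simpa using (hends (by simp)).1
            · rw [getLastI_append_singleton (token ++ run) c]; exact hws')]
        simp

theorem alt_eq_flatMap (requires : List String) :
    parse_requires_alt requires
      = requires.flatMap (fun req => (charParse req.toList).map String.ofList) := by
  unfold parse_requires_alt
  calc requires.foldl (fun acc req => pvScan req.toList [] [] acc) []
      = requires.foldl (fun acc req => acc ++ (charParse req.toList).map String.ofList) [] := by
        apply List.foldl_ext
        intro acc req _
        simpa using pvScan_eq req.toList [] [] acc (fun _ => rfl) (by decide) (by simp) (by simp)
    _ = _ := by
        rw [PySem.List.foldl_append_eq_flatMap]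
        simp

-- ===== VERDICT (by name: the statement is the Claim_ definition above) =====
theorem parse_requires_spec : Claim_equal_parse_requires := by
  intro requires _
  unfold Spec_parse_requires
  rw [parse_requires_eq_flatMap, alt_eq_flatMap]
  simp only [strPipeline_eq]
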